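-- pv_equiv track=rewrite | github.com/theonewolf/aoc2021 | day3/part2.py | co2_bit_criteria
-- ===== SOURCE A (Python) =====
-- def co2_bit_criteria(position: int, data):
--     counts = [0,0]
--
--     for line in data:
--         counts[int(line[position])] += 1
--
--     if counts[0] > counts[1]:
--         return [item for item in data if item[position] == '1']
--     elif counts[1] > counts[0]:
--         return [item for item in data if item[position] == '0']
--     else:
--         return [item for item in data if item[position] == '0']
-- ===== SOURCE B (Python) =====
-- def co2_bit_criteria(position: int, data):
--     # Single-pass bucketing instead of count-then-refilter (one traversal, not two).
--     groups = [[], []]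
--     for item in data:
--         groups[int(item[position])].append(item)
--     return groups[1] if len(groups[0]) > len(groups[1]) else groups[0]
-- ===== Notes on version B (the rewrite author's own statement) =====
-- stated objective: alternative
-- what changed: Replaces the count pass plus a second filtering pass with a single bucketing pass that partitions the lines into the '0' and '1' groups and returns the appropriate bucket.
import Mathlib
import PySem

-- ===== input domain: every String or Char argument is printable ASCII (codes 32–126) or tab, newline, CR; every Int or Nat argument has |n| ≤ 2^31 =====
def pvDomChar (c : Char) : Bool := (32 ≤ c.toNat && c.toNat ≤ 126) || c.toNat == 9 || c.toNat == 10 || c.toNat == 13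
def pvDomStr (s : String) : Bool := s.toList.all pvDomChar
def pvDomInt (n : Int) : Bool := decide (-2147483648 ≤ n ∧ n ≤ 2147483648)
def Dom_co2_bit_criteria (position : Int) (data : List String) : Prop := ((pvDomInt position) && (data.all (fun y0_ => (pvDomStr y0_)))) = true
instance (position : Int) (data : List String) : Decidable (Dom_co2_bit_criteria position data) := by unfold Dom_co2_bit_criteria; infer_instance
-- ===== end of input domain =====

-- B replaces A's count-then-refilter two-pass structure with a single bucketing pass (same cost class; one traversal instead of two).
-- ===== PORT A =====
-- Port of A: a counting fold over data, then the if/elif/else filter chain (the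
-- elif and else branches both filter '0', as in the Python).
def co2_bit_criteria (position : Int) (data : List String) : List String :=
  let counts : Int × Int := data.foldl (fun c line =>
    match PySem.Str.pyGet? line position with
    | some '0' => (c.1 + 1, c.2)
    | some '1' => (c.1, c.2 + 1)
    | _ => c) (0, 0)   -- other characters raise in Python: outside Pre_
  if counts.1 > counts.2 then
    data.filter (fun item => PySem.Str.pyGet? item position == some '1')
  else if counts.2 > counts.1 then
    data.filter (fun item => PySem.Str.pyGet? item position == some '0')
  else
    data.filter (fun item => PySem.Str.pyGet? item position == some '0')

-- ===== PORT B =====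
-- Port of B: one bucketing pass, then pick the bucket.
def co2_bit_criteria_alt (position : Int) (data : List String) : List String :=
  let groups : List String × List String := data.foldl (fun g item =>
    if PySem.Str.pyGet? item position = some '0' then (g.1 ++ [item], g.2)
    else if PySem.Str.pyGet? item position = some '1' then (g.1, g.2 ++ [item])
    else g) ([], [])   -- other characters raise in Python: outside Pre_
  if groups.1.length > groups.2.length then groups.2 else groups.1

-- ===== PRECONDITION & SPEC =====
-- Pre_: A raises (IndexError or ValueError / counts-IndexError) unless every line
-- has a '0' or '1' at the given position.
def Pre_co2_bit_criteria (position : Int) (data : List String) : Prop :=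
  ∀ line ∈ data, PySem.Str.pyGet? line position = some '0' ∨ PySem.Str.pyGet? line position = some '1'
instance (position : Int) (data : List String) : Decidable (Pre_co2_bit_criteria position data) := by
  unfold Pre_co2_bit_criteria; infer_instance
def pvWitness_co2_bit_criteria : Int × List String := (1, ["00", "01", "11"])

def Spec_co2_bit_criteria (position : Int) (data : List String) (out : List String) : Prop := out = co2_bit_criteria_alt position data
instance (position : Int) (data : List String) (out : List String) : Decidable (Spec_co2_bit_criteria position data out) := by unfold Spec_co2_bit_criteria; infer_instance

-- ===== CLAIM (what is proved, stated in full; the proofs are below) =====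
def Claim_equal_co2_bit_criteria : Prop := ∀ (position : Int) (data : List String), Dom_co2_bit_criteria position data → Pre_co2_bit_criteria position data → Spec_co2_bit_criteria position data (co2_bit_criteria position data)

-- ===== LEMMAS AND PROOFS =====

-- A's counting fold equals the lengths of the two filters.
theorem foldA_eq (position : Int) (data : List String)
    (h : Pre_co2_bit_criteria position data) (c : Int × Int) :
    data.foldl (fun c line =>
      match PySem.Str.pyGet? line position with
      | some '0' => (c.1 + 1, c.2)
      | some '1' => (c.1, c.2 + 1)
      | _ => c) c
    = (c.1 + (data.filter (fun item => PySem.Str.pyGet? item position == some '0')).length,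
       c.2 + (data.filter (fun item => PySem.Str.pyGet? item position == some '1')).length) := by
  induction data generalizing c with
  | nil => simp
  | cons x xs ih =>
    have hx := h x (by simp)
    have hxs : Pre_co2_bit_criteria position xs := fun l hl => h l (by simp [hl])
    simp [PySem.Str.pyGet?] at hx
    rcases hx with hx | hx
    · have ih' := ih hxs (c.1 + 1, c.2)
      simp [PySem.Str.pyGet?] at ih'
      simp [List.foldl_cons, PySem.Str.pyGet?, hx, ih', Prod.ext_iff] ; omega
    · have ih' := ih hxs (c.1, c.2 + 1)
      simp [PySem.Str.pyGet?] at ih'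
      simp [List.foldl_cons, PySem.Str.pyGet?, hx, ih', Prod.ext_iff] ; omega

-- B's bucketing fold produces exactly the two filters (appended to the accumulators).
theorem foldB_eq (position : Int) (data : List String)
    (h : Pre_co2_bit_criteria position data) (g : List String × List String) :
    data.foldl (fun g item =>
      if PySem.Str.pyGet? item position = some '0' then (g.1 ++ [item], g.2)
      else if PySem.Str.pyGet? item position = some '1' then (g.1, g.2 ++ [item])
      else g) g
    = (g.1 ++ data.filter (fun item => PySem.Str.pyGet? item position == some '0'),
       g.2 ++ data.filter (fun item => PySem.Str.pyGet? item position == some '1')) := by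
  induction data generalizing g with
  | nil => simp
  | cons x xs ih =>
    have hx := h x (by simp)
    have hxs : Pre_co2_bit_criteria position xs := fun l hl => h l (by simp [hl])
    simp [PySem.Str.pyGet?] at hx
    rcases hx with hx | hx
    · have ih' := ih hxs (g.1 ++ [x], g.2)
      simp [PySem.Str.pyGet?] at ih'
      simp [List.foldl_cons, PySem.Str.pyGet?, hx, ih']
    · have ih' := ih hxs (g.1, g.2 ++ [x])
      simp [PySem.Str.pyGet?] at ih'
      simp [List.foldl_cons, PySem.Str.pyGet?, hx, ih']

theorem ports_eq (position : Int) (data : List String)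
    (h : Pre_co2_bit_criteria position data) :
    co2_bit_criteria position data = co2_bit_criteria_alt position data := by
  unfold co2_bit_criteria co2_bit_criteria_alt
  rw [foldA_eq position data h, foldB_eq position data h]
  simp only [List.nil_append]
  set f0 := data.filter (fun item => PySem.Str.pyGet? item position == some '0')
  set f1 := data.filter (fun item => PySem.Str.pyGet? item position == some '1')
  by_cases hgt : (f0.length : Int) > (f1.length : Int) <;> simp_all

-- ===== VERDICT (by name: the statement is the Claim_ definition above) =====
theorem co2_bit_criteria_spec : Claim_equal_co2_bit_criteria := by
  intro position data _ hpre
  unfold Spec_co2_bit_criteria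
  exact ports_eq position data hpre
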